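-- pv_equiv track=rewrite | github.com/chinnychinchin/coding_test | findRhymePattern.py | checkCond3
-- ===== SOURCE A (Python) =====
-- def isVowel(letter, word):
--
--     if letter in ['a','e','i','o','u']:
--         return True
--     elif letter == 'y' and (letter != word[0] and letter != word[-1]):
--         return True
--
--     return False
--
-- def checkCond3(sb):
--
--     indexes_of_vowels = []
--     for i in range(len(sb)):
--         if isVowel(sb[i],sb):
--             indexes_of_vowels.append(i)
--
--     def checkConsecutive(l):
--         return sorted(l) == list(range(min(l), max(l)+1))
--
--
--     return checkConsecutive(indexes_of_vowels)
-- ===== SOURCE B (Python) =====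
-- def checkCond3(sb):
--     # Vowel positions are consecutive iff the vowels form a single contiguous
--     # run: count the maximal runs of vowels in one pass and accept iff <= 1.
--     y_vowel = bool(sb) and sb[0] != 'y' and sb[-1] != 'y'
--     runs = 0
--     prev = False
--     for ch in sb:
--         v = ch in 'aeiou' or (ch == 'y' and y_vowel)
--         if v and not prev:
--             runs += 1
--         prev = v
--     return runs <= 1
-- ===== Notes on version B (the rewrite author's own statement) =====
-- stated objective: simpler
-- what changed: Instead of collecting vowel indices and comparing sorted(l) with list(range(min(l),max(l)+1)), B never materialises indices at all: it counts maximal runs of vowels in a single boolean-state pass and accepts iff there is at most one run (a recogniser of the pattern C*V+C*).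
import Mathlib
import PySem

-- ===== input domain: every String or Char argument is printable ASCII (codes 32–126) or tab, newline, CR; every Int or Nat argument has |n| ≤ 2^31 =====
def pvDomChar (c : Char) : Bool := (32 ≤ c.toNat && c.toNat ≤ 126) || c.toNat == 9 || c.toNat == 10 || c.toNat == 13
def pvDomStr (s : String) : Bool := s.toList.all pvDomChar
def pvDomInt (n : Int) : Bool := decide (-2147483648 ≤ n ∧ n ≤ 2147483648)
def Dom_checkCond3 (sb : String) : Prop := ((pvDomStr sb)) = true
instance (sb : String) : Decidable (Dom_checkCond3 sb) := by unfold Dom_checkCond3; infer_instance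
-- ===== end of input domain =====

-- B drops the index list and the sorted/min/max/range comparison entirely: it counts
-- maximal vowel runs in one boolean-state pass and accepts iff there is at most one (simpler).

-- ===== PORT A =====
def isVowelA (letter : Char) (word : List Char) : Bool :=
  if letter ∈ ['a', 'e', 'i', 'o', 'u'] then
    true
  else
    -- letter == 'y' and letter != word[0] and letter != word[-1]
    -- word[0] / word[-1] via pyGet? (none = IndexError; A only calls this with word = sb nonempty)
    match PySem.List.pyGet? word 0, PySem.List.pyGet? word (-1) with
    | some h, some t => letter == 'y' && (letter != h && letter != t)
    | _, _ => false

def checkCond3 (sb : String) : Bool :=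
  let cs := sb.toList
  let indexes_of_vowels : List Int :=
    (PySem.List.pyRange 0 cs.length 1).foldl
      (fun acc i => if isVowelA (PySem.List.pyGetD cs i ' ') cs then acc ++ [i] else acc) []
  -- checkConsecutive: sorted(l) == list(range(min(l), max(l)+1)); min/max of [] raise ValueError (outside Pre_)
  match PySem.List.min? indexes_of_vowels (fun x => x),
        PySem.List.max? indexes_of_vowels (fun x => x) with
  | some mn, some mx =>
      PySem.List.sorted indexes_of_vowels (fun x => x) false == PySem.List.pyRange mn (mx + 1) 1
  | _, _ => false

-- ===== PORT B =====
def checkCond3_alt (sb : String) : Bool :=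
  let cs := sb.toList
  let yVowel := !cs.isEmpty && cs.headD ' ' != 'y' && cs.getLastD ' ' != 'y'
  let st := cs.foldl
    (fun (s : Int × Bool) ch =>
      let v := (['a', 'e', 'i', 'o', 'u'] : List Char).contains ch || (ch == 'y' && yVowel)
      ((if v && !s.2 then s.1 + 1 else s.1), v))
    ((0 : Int), false)
  decide (st.1 ≤ 1)

-- ===== PRECONDITION & SPEC =====
-- Pre_ excludes exactly the strings containing no vowel (by A's rule): there A's min()/max()
-- of the empty index list raises ValueError.
-- 'sb contains a vowel': some letter is in aeiou, or is a 'y' while the word neither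
-- starts nor ends with 'y' (A's rule for 'y')
def hasVowel (sb : String) : Bool :=
  sb.toList.any (fun c => (['a', 'e', 'i', 'o', 'u'] : List Char).contains c ||
    (c == 'y' && sb.toList.head? != some 'y' && sb.toList.getLast? != some 'y'))

def Pre_checkCond3 (sb : String) : Prop := hasVowel sb = true
instance (sb : String) : Decidable (Pre_checkCond3 sb) := by unfold Pre_checkCond3; infer_instance
def pvWitness_checkCond3 : String := "ab"

def Spec_checkCond3 (sb : String) (out : Bool) : Prop := out = checkCond3_alt sb
instance (sb : String) (out : Bool) : Decidable (Spec_checkCond3 sb out) := by unfold Spec_checkCond3; infer_instance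

-- ===== CLAIM (what is proved, stated in full; the proofs are below) =====
def Claim_equal_checkCond3 : Prop := ∀ (sb : String), Dom_checkCond3 sb → Pre_checkCond3 sb → Spec_checkCond3 sb (checkCond3 sb)

-- ===== LEMMAS AND PROOFS =====

-- positions (from pos) of the true flags
def idxOf : List Bool → Int → List Int
  | [], _ => []
  | true :: r, pos => pos :: idxOf r (pos + 1)
  | false :: r, pos => idxOf r (pos + 1)

-- number of maximal runs of true, entering with flag prev
def runsAux : List Bool → Bool → Int
  | [], _ => 0
  | b :: r, prev => (if b && !prev then 1 else 0) + runsAux r b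

theorem runsAux_nonneg (bs : List Bool) (prev : Bool) : 0 ≤ runsAux bs prev := by
  induction bs generalizing prev with
  | nil => simp [runsAux]
  | cons b r ih =>
      have := ih b
      unfold runsAux
      split_ifs <;> omega

theorem idxOf_ge (bs : List Bool) (pos : Int) : ∀ x ∈ idxOf bs pos, pos ≤ x := by
  induction bs generalizing pos with
  | nil => simp [idxOf]
  | cons b r ih =>
      cases b <;> simp only [idxOf]
      · exact fun x hx => le_trans (by omega) (ih (pos + 1) x hx)
      · intro x hx
        rcases List.mem_cons.mp hx with rfl | hm
        · exact le_refl _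
        · exact le_trans (by omega) (ih (pos + 1) x hm)

theorem idxOf_pairwise (bs : List Bool) (pos : Int) : (idxOf bs pos).Pairwise (· < ·) := by
  induction bs generalizing pos with
  | nil => simp [idxOf]
  | cons b r ih =>
      cases b <;> simp only [idxOf]
      · exact ih (pos + 1)
      · exact List.pairwise_cons.mpr
          ⟨fun x hx => lt_of_lt_of_le (by omega) (idxOf_ge r (pos + 1) x hx), ih (pos + 1)⟩

theorem runs_zero (bs : List Bool) (pos : Int) :
    runsAux bs false = 0 ↔ idxOf bs pos = [] := by
  induction bs generalizing pos with
  | nil => simp [runsAux, idxOf]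
  | cons b r ih =>
      cases b
      · simpa [runsAux, idxOf] using ih (pos + 1)
      · have := runsAux_nonneg r true
        simp only [runsAux, idxOf, Bool.and_self, Bool.not_false, if_true]
        constructor
        · intro h; omega
        · intro h; exact absurd h (by simp)

theorem foldl_min_of_le (t : List Int) (h : Int) (hle : ∀ y ∈ t, h ≤ y) :
    t.foldl min h = h := by
  induction t with
  | nil => rfl
  | cons a r ih =>
      have ha : h ≤ a := hle a (by simp)
      have : min h a = h := min_eq_left ha
      simp only [List.foldl_cons, this]
      exact ih (fun y hy => hle y (by simp [hy]))

theorem foldl_max_of_sorted (t : List Int) (h : Int)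
    (hp : t.Pairwise (· ≤ ·)) (hle : ∀ y ∈ t, h ≤ y) :
    t.foldl max h = t.getLastD h := by
  induction t generalizing h with
  | nil => rfl
  | cons a r ih =>
      have ha : h ≤ a := hle a (by simp)
      have : max h a = a := max_eq_right ha
      simp only [List.foldl_cons, this, List.getLastD_cons]
      exact ih a (hp.of_cons) (fun y hy => (List.pairwise_cons.mp hp).1 y hy)

-- length of a strictly increasing list is at most its span + 1
theorem chain_len_le (t : List Int) (h : Int)
    (hp : (h :: t).Pairwise (· < ·)) :
    ((h :: t).length : Int) ≤ t.getLastD h - h + 1 := by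
  induction t generalizing h with
  | nil => simp
  | cons a r ih =>
      have hha : h < a := (List.pairwise_cons.mp hp).1 a (by simp)
      have := ih a (hp.of_cons)
      simp only [List.length_cons, List.getLastD_cons] at *
      push_cast at *
      omega

theorem le_getLastD_of_le (t : List Int) (h : Int) (hle : ∀ y ∈ t, h ≤ y) :
    h ≤ t.getLastD h := by
  rcases List.mem_cons.mp (List.getLastD_mem_cons (l := t) (a := h)) with he | hm
  · exact le_of_eq he.symm
  · exact hle _ hm

-- a strictly increasing nonempty list is the full integer range iff
-- its length equals its span + 1
theorem consecutive_iff (t : List Int) (h : Int)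
    (hp : (h :: t).Pairwise (· < ·)) :
    (h :: t = PySem.List.pyRange h (t.getLastD h + 1) 1) ↔
      (((h :: t).length : Int) = t.getLastD h - h + 1) := by
  induction t generalizing h with
  | nil =>
      simp [PySem.List.pyRange_one_singleton]
  | cons a r ih =>
      have hha : h < a := (List.pairwise_cons.mp hp).1 a (by simp)
      have hlast : h ≤ (a :: r).getLastD h := by
        apply le_getLastD_of_le
        intro y hy; exact le_of_lt ((List.pairwise_cons.mp hp).1 y hy)
      constructor
      · intro he
        have hlen := congrArg List.length he
        rw [PySem.List.length_pyRange_one] at hlen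
        have hnn : (0:Int) ≤ (a :: r).getLastD h + 1 - h := by omega
        rw [hlen]
        push_cast [Int.toNat_of_nonneg hnn]
        omega
      · intro hlen
        have hle2 := chain_len_le r a (hp.of_cons)
        have hgl : (a :: r).getLastD h = r.getLastD a := by rw [List.getLastD_cons]
        rw [hgl] at hlen hlast ⊢
        simp only [List.length_cons] at hlen hle2
        have ha1 : a = h + 1 := by push_cast at hlen hle2 ⊢; omega
        have hlen' : ((a :: r).length : Int) = r.getLastD a - a + 1 := by
          simp only [List.length_cons]; push_cast at hlen ⊢; omega
        have htail := (ih a (hp.of_cons)).mpr hlen'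
        rw [PySem.List.pyRange_one_cons (by omega : h < r.getLastD a + 1)]
        rw [← ha1, ← htail]

-- inside a run: no further run starts iff the remaining trues extend the current
-- run without a gap (last position = (m-1) + count, where m is the next position)
theorem runsAux_true_iff (bs : List Bool) (m : Int) :
    runsAux bs true = 0 ↔
      (idxOf bs m).getLastD (m - 1) = (m - 1) + ((idxOf bs m).length : Int) := by
  induction bs generalizing m with
  | nil => simp [runsAux, idxOf]
  | cons b r ih =>
      cases b
      · -- run has ended: no true may follow at all
        simp only [runsAux, Bool.false_and, if_neg (by simp : ¬(false = true)), zero_add, idxOf]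
        rw [runs_zero r (m + 1)]
        constructor
        · intro h; rw [h]; simp
        · intro h
          cases hni : idxOf r (m + 1) with
          | nil => rfl
          | cons x t =>
              exfalso
              have hpw : (x :: t).Pairwise (· < ·) := hni ▸ idxOf_pairwise r (m + 1)
              have hx : m + 1 ≤ x := idxOf_ge r (m + 1) x (by rw [hni]; simp)
              have hlen := chain_len_le t x hpw
              simp only [List.length_cons] at hlen
              rw [hni] at h
              simp only [List.getLastD_cons, List.length_cons] at h
              have hlast : x ≤ t.getLastD x := le_getLastD_of_le t x
                (fun y hy => le_of_lt ((List.pairwise_cons.mp hpw).1 y hy))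
              push_cast at h hlen
              omega
      · simp only [runsAux, Bool.not_true, Bool.and_false, if_neg (by simp : ¬(false = true)),
          zero_add, idxOf, List.getLastD_cons, List.length_cons]
        rw [ih (m + 1)]
        simp only [add_sub_cancel_right]
        constructor <;> intro h <;> (push_cast at h ⊢; omega)

-- the heart: with at least one true, exactly one run iff count = span + 1
theorem runs_one_iff (bs : List Bool) (pos h : Int) (t : List Int)
    (hidx : idxOf bs pos = h :: t) :
    (runsAux bs false = 1 ↔ (1 + (t.length : Int) = t.getLastD h - h + 1)) := by
  induction bs generalizing pos with
  | nil => simp [idxOf] at hidx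
  | cons b r ih =>
      cases b
      · simp only [idxOf] at hidx
        simp only [runsAux, Bool.false_and, if_neg (by simp : ¬(false = true)), zero_add]
        exact ih (pos + 1) hidx
      · simp only [idxOf, List.cons.injEq] at hidx
        obtain ⟨rfl, rfl⟩ := hidx
        simp only [runsAux, Bool.and_self, Bool.not_false, if_true]
        have hnn := runsAux_nonneg r true
        have h1 : (1 : Int) + runsAux r true = 1 ↔ runsAux r true = 0 := by omega
        rw [h1, runsAux_true_iff r (pos + 1)]
        constructor <;> intro hx <;>
          (simp only [add_sub_cancel_right] at hx ⊢; omega)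

-- B's fold computes runsAux of the flag list
theorem foldB (Q : Char → Bool) (cs : List Char) (n : Int) (prev : Bool) :
    (cs.foldl (fun (s : Int × Bool) ch =>
        ((if Q ch && !s.2 then s.1 + 1 else s.1), Q ch)) (n, prev)).1
      = n + runsAux (cs.map Q) prev := by
  induction cs generalizing n prev with
  | nil => simp [runsAux]
  | cons c r ih =>
      simp only [List.foldl_cons, List.map_cons, runsAux]
      rw [ih]
      split_ifs <;> ring

-- A's filtered enumeration = idxOf of the flag list
theorem enum_filter_idxOf (Q : Char → Bool) (cs : List Char) (p : Int) :
    (((PySem.List.enumerate cs p).filter (fun pr => Q pr.2)).map (·.1))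
      = idxOf (cs.map Q) p := by
  induction cs generalizing p with
  | nil => simp [PySem.List.enumerate_nil, idxOf]
  | cons c r ih =>
      rw [PySem.List.enumerate_cons, List.map_cons]
      cases hq : Q c
      · simp only [List.filter_cons, hq, Bool.false_eq_true, if_false, idxOf]
        exact ih (p + 1)
      · simp only [List.filter_cons, hq, if_true, List.map_cons, idxOf]
        rw [ih (p + 1)]

theorem idxOf_ne_nil_of_mem (bs : List Bool) (pos : Int) (hm : true ∈ bs) :
    idxOf bs pos ≠ [] := by
  induction bs generalizing pos with
  | nil => simp at hm
  | cons b r ih =>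
      cases b
      · simp only [idxOf]
        exact ih (pos + 1) (by simpa using hm)
      · simp [idxOf]

-- A's index-collecting loop = map fst of the filtered enumeration
theorem idxs_eq (cs : List Char) :
    (PySem.List.pyRange 0 cs.length 1).foldl
      (fun acc i => if isVowelA (PySem.List.pyGetD cs i ' ') cs then acc ++ [i] else acc) []
    = (((PySem.List.enumerate cs 0).filter (fun p => isVowelA p.2 cs)).map (·.1)) := by
  rw [PySem.List.foldl_append_if_eq_filter]
  rw [PySem.List.enumerate_eq_map_pyRange cs ' ']
  rw [List.filter_map, List.map_map]
  simp [Function.comp_def]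

-- B's inlined vowel test agrees with isVowelA on a nonempty word
theorem pred_eq (c0 : Char) (rest : List Char) (c : Char) :
    ((['a', 'e', 'i', 'o', 'u'] : List Char).contains c ||
      (c == 'y' && (!(c0 :: rest).isEmpty && (c0 :: rest).headD ' ' != 'y' &&
        (c0 :: rest).getLastD ' ' != 'y')))
    = isVowelA c (c0 :: rest) := by
  unfold isVowelA
  rw [PySem.List.pyGet?_zero_cons, PySem.List.pyGet?_neg_one]
  have hgl : (c0 :: rest).getLast? = some ((c0 :: rest).getLastD ' ') := by
    cases h : (c0 :: rest).getLast? with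
    | none => simp at h
    | some x => simp [List.getLastD_eq_getLast?, h]
  rw [hgl]
  by_cases hv : c ∈ (['a', 'e', 'i', 'o', 'u'] : List Char)
  · simp [hv]
  · have hv' : (['a', 'e', 'i', 'o', 'u'] : List Char).contains c = false := by
      simpa using hv
    simp only [hv', if_neg hv, Bool.false_or]
    by_cases hy : c = 'y'
    · subst hy
      simp only [List.isEmpty_cons, Bool.not_false, List.headD_cons, Bool.true_and]
      rw [show (c0 != 'y') = ('y' != c0) from bne_comm,
        show ((c0 :: rest).getLastD ' ' != 'y') = ('y' != (c0 :: rest).getLastD ' ') from bne_comm]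
    · have : (c == 'y') = false := by simp [hy]
      simp [this]

-- membership in the vowel set, propositional form of Pre_, implies isVowelA
theorem isVowelA_of_pred (cs : List Char) (c : Char) (hc : c ∈ cs)
    (hp : c ∈ (['a', 'e', 'i', 'o', 'u'] : List Char) ∨
      (c = 'y' ∧ cs.head? ≠ some 'y' ∧ cs.getLast? ≠ some 'y')) :
    isVowelA c cs = true := by
  obtain ⟨c0, rest, rfl⟩ := List.exists_cons_of_ne_nil (List.ne_nil_of_mem hc)
  rw [← pred_eq]
  rcases hp with hv | ⟨hy, hh, hl⟩
  · simp [hv]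
  · subst hy
    have hgl : (c0 :: rest).getLast? = some ((c0 :: rest).getLastD ' ') := by
      cases h : (c0 :: rest).getLast? with
      | none => simp at h
      | some x => simp [List.getLastD_eq_getLast?, h]
    rw [hgl] at hl
    have h1 : c0 ≠ 'y' := by simpa using hh
    have h2 : (c0 :: rest).getLastD ' ' ≠ 'y' := by
      intro h; exact hl (by rw [h])
    have h2' : (c0 :: rest).getLast?.getD ' ' ≠ 'y' := by
      rw [← List.getLastD_eq_getLast?]; exact h2
    simp [h1, h2']

theorem list_beq_eq_decide (xs ys : List Int) : (xs == ys) = decide (xs = ys) := by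
  by_cases h : xs = ys <;> simp [h]

theorem checkCond3_spec' (sb : String) (hpre : Pre_checkCond3 sb) :
    checkCond3 sb = checkCond3_alt sb := by
  unfold checkCond3 checkCond3_alt
  dsimp only
  rw [idxs_eq]
  rw [Pre_checkCond3, hasVowel, List.any_eq_true] at hpre
  obtain ⟨c, hc, hb⟩ := hpre
  have hp : c ∈ (['a', 'e', 'i', 'o', 'u'] : List Char) ∨
      (c = 'y' ∧ sb.toList.head? ≠ some 'y' ∧ sb.toList.getLast? ≠ some 'y') := by
    simp only [Bool.or_eq_true, Bool.and_eq_true, List.contains_iff_mem, beq_iff_eq,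
      bne_iff_ne, ne_eq] at hb
    tauto
  obtain ⟨c0, rest, hcs⟩ := List.exists_cons_of_ne_nil (List.ne_nil_of_mem hc)
  -- same per-character flag on both sides
  set Q : Char → Bool := fun c => isVowelA c sb.toList with hQ
  have hmapB : sb.toList.map (fun ch =>
      (['a', 'e', 'i', 'o', 'u'] : List Char).contains ch ||
        (ch == 'y' && (!sb.toList.isEmpty && sb.toList.headD ' ' != 'y' &&
          sb.toList.getLastD ' ' != 'y'))) = sb.toList.map Q := by
    apply List.map_congr_left
    intro x hx
    simp only [hQ]
    rw [hcs]
    exact pred_eq c0 rest x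
  have hfil :
      (PySem.List.enumerate sb.toList 0).filter (fun p => isVowelA p.2 sb.toList)
      = (PySem.List.enumerate sb.toList 0).filter (fun p => Q p.2) := rfl
  rw [hfil, enum_filter_idxOf Q sb.toList 0, foldB, hmapB]
  set bs := sb.toList.map Q with hbs
  -- bs contains a true flag
  have htr : true ∈ bs := by
    rw [hbs]
    have : Q c = true := isVowelA_of_pred sb.toList c hc hp
    exact this ▸ List.mem_map_of_mem hc
  obtain ⟨h, t, hlc⟩ := List.exists_cons_of_ne_nil (idxOf_ne_nil_of_mem bs 0 htr)
  rw [hlc]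
  have hpw : (h :: t).Pairwise (· < ·) := hlc ▸ idxOf_pairwise bs 0
  have hhd : ∀ y ∈ t, h ≤ y := fun y hy => le_of_lt ((List.pairwise_cons.mp hpw).1 y hy)
  rw [PySem.List.min?_id_cons, PySem.List.max?_id_cons,
    foldl_min_of_le t h hhd, foldl_max_of_sorted t h (hpw.of_cons.imp le_of_lt) hhd]
  dsimp only
  rw [PySem.List.sorted_eq_self_of_pairwise (h :: t) (fun x => x) (hpw.imp le_of_lt)]
  rw [list_beq_eq_decide]
  -- A's range test ↔ count-vs-span ↔ exactly one run; B's runs ≤ 1 with runs ≥ 1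
  have hA := consecutive_iff t h hpw
  have hruns := runs_one_iff bs 0 h t hlc
  have hne0 : runsAux bs false ≠ 0 := by
    intro h0
    exact idxOf_ne_nil_of_mem bs 0 htr ((runs_zero bs 0).mp h0)
  have hnn := runsAux_nonneg bs false
  have hiff : (h :: t = PySem.List.pyRange h (t.getLastD h + 1) 1) ↔
      (0 + runsAux bs false ≤ 1) := by
    rw [hA]
    constructor
    · intro hx
      have : runsAux bs false = 1 := hruns.mpr (by
        simp only [List.length_cons] at hx; push_cast at hx ⊢; omega)
      omega
    · intro hx
      have h1 : runsAux bs false = 1 := by omega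
      have := hruns.mp h1
      simp only [List.length_cons]; push_cast; omega
  exact decide_eq_decide.mpr hiff

-- ===== VERDICT (by name: the statement is the Claim_ definition above) =====
theorem checkCond3_spec : Claim_equal_checkCond3 := by
  intro sb _ hpre
  unfold Spec_checkCond3
  exact checkCond3_spec' sb hpre
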